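-- pv_equiv track=rewrite | github.com/AlexWUrobot/leetcode_python | Count_Max_Profitable_Groups.py | countMaximumProfitableGroups
-- ===== SOURCE A (Python) =====
-- def countMaximumProfitableGroups(stockPrice):
--     n = len(stockPrice)
--     # Initialize count of profitable groups
--     count = 0
--
--     # Check all possible subarrays
--     for l in range(n):
--         for r in range(l, n):
--             # Extract the subarray
--             subarray = stockPrice[l:r+1]
--             # Check if the first or last element is the maximum of the subarray
--             if subarray[0] == max(subarray) or subarray[-1] == max(subarray):
--                 count += 1
--
--     return count
-- ===== SOURCE B (Python) =====
-- def countMaximumProfitableGroups(stockPrice):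
--     # One pass per left endpoint with a running maximum: the inner slice+max scan
--     # of the original disappears (O(n^2) instead of O(n^3)).
--     n = len(stockPrice)
--     count = 0
--     for l in range(n):
--         m = stockPrice[l]
--         for r in range(l, n):
--             if stockPrice[r] > m:
--                 m = stockPrice[r]
--             if stockPrice[l] == m or stockPrice[r] == m:
--                 count += 1
--     return count
-- ===== Notes on version B (the rewrite author's own statement) =====
-- stated objective: faster
-- what changed: B maintains a running maximum per left endpoint instead of re-slicing the list and rescanning it with max() for every (l,r) pair, removing the inner O(n) scan.
import Mathlib
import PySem

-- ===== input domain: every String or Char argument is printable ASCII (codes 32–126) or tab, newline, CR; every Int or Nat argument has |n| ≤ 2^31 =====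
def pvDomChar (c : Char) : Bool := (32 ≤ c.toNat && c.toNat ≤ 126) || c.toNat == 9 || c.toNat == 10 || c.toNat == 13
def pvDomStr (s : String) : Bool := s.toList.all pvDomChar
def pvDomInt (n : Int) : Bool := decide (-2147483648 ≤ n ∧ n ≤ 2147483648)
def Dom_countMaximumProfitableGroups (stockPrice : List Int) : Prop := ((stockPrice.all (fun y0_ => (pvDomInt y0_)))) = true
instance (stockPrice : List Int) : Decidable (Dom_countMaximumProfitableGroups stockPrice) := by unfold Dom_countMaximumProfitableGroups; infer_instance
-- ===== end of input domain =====

-- B keeps a running maximum per left endpoint instead of re-slicing and rescanning with max(); same value, O(n^2) instead of O(n^3).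

-- ===== PORT A =====
def countMaximumProfitableGroups (stockPrice : List Int) : Int :=
  let n : Int := stockPrice.length
  let count : Int := 0
  (PySem.List.pyRange 0 n 1).foldl (fun count l =>
    (PySem.List.pyRange l n 1).foldl (fun count r =>
      let subarray := PySem.List.slice stockPrice (some l) (some (r + 1))
      if PySem.List.pyGet? subarray 0 = PySem.List.max? subarray (fun y => y) ∨
         PySem.List.pyGet? subarray (-1) = PySem.List.max? subarray (fun y => y)
      then count + 1 else count) count) count

-- ===== PORT B =====
def countMaximumProfitableGroups_alt (stockPrice : List Int) : Int :=
  let n : Int := stockPrice.length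
  let count : Int := 0
  (PySem.List.pyRange 0 n 1).foldl (fun count l =>
    ((PySem.List.pyRange l n 1).foldl (fun (st : Int × Int) r =>
      let m := if PySem.List.pyGetD stockPrice r 0 > st.1 then PySem.List.pyGetD stockPrice r 0 else st.1
      (m, if PySem.List.pyGetD stockPrice l 0 = m ∨ PySem.List.pyGetD stockPrice r 0 = m
          then st.2 + 1 else st.2))
      (PySem.List.pyGetD stockPrice l 0, count)).2) count

-- ===== PRECONDITION & SPEC =====
def Spec_countMaximumProfitableGroups (stockPrice : List Int) (out : Int) : Prop := out = countMaximumProfitableGroups_alt stockPrice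
instance (stockPrice : List Int) (out : Int) : Decidable (Spec_countMaximumProfitableGroups stockPrice out) := by unfold Spec_countMaximumProfitableGroups; infer_instance

-- ===== CLAIM (what is proved, stated in full; the proofs are below) =====
def Claim_equal_countMaximumProfitableGroups : Prop := ∀ (stockPrice : List Int), Dom_countMaximumProfitableGroups stockPrice → Spec_countMaximumProfitableGroups stockPrice (countMaximumProfitableGroups stockPrice)

-- ===== LEMMAS AND PROOFS =====

-- A's inner step over r (for fixed l).
def pvStepA (sp : List Int) (l : Int) (count r : Int) : Int :=
  let subarray := PySem.List.slice sp (some l) (some (r + 1))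
  if PySem.List.pyGet? subarray 0 = PySem.List.max? subarray (fun y => y) ∨
     PySem.List.pyGet? subarray (-1) = PySem.List.max? subarray (fun y => y)
  then count + 1 else count

-- B's inner step over r (for fixed l).
def pvStepB (sp : List Int) (l : Int) (st : Int × Int) (r : Int) : Int × Int :=
  let m := if PySem.List.pyGetD sp r 0 > st.1 then PySem.List.pyGetD sp r 0 else st.1
  (m, if PySem.List.pyGetD sp l 0 = m ∨ PySem.List.pyGetD sp r 0 = m then st.2 + 1 else st.2)

theorem pv_inner_eq (sp : List Int) (l : Nat) (hl : l < sp.length) :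
    ∀ (fuel j : Nat) (c m : Int), sp.length ≤ l + j + fuel →
      m = ((sp.drop l).take j).foldl max sp[l] →
      (PySem.List.pyRange ((l : Int) + j) sp.length 1).foldl (pvStepA sp l) c
        = ((PySem.List.pyRange ((l : Int) + j) sp.length 1).foldl (pvStepB sp l) (m, c)).2 := by
  intro fuel
  induction fuel with
  | zero =>
    intro j c m hle hm
    rw [PySem.List.pyRange_one_eq_nil (by omega)]
    simp
  | succ fuel ih =>
    intro j c m hle hm
    by_cases hend : sp.length ≤ l + j
    · rw [PySem.List.pyRange_one_eq_nil (by omega)]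
      simp
    · push_neg at hend
      rw [PySem.List.pyRange_one_cons (by omega)]
      simp only [List.foldl_cons]
      have hslice : PySem.List.slice sp (some (l : Int)) (some ((l : Int) + j + 1))
          = (sp.drop l).take (j + 1) := by
        have : ((l : Int) + j + 1) = ((l + j + 1 : Nat) : Int) := by push_cast; ring
        rw [this, PySem.List.slice_natCast]
        congr 1
        omega
      have htake : (sp.drop l).take (j + 1) = (sp.drop l).take j ++ [sp[l + j]] := by
        rw [List.take_add_one]
        simp
      have hdropcons : sp.drop l = sp[l] :: sp.drop (l + 1) := by
        rw [List.drop_eq_getElem_cons hl]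
      -- max of the subarray equals the updated running maximum
      have hm' : ((sp.drop l).take (j + 1)).foldl max sp[l] = max m sp[l + j] := by
        rw [htake, List.foldl_append]
        simp [hm]
      have hconsform : (sp.drop l).take (j + 1) = sp[l] :: (sp.drop (l + 1)).take j := by
        rw [hdropcons]; rfl
      have hmax? : PySem.List.max? ((sp.drop l).take (j + 1)) (fun y => y)
          = some (max m sp[l + j]) := by
        rw [hconsform, PySem.List.max?_id_cons, ← hm']
        rw [hconsform]
        simp
      -- head and last of the subarray
      have hhead : PySem.List.pyGet? ((sp.drop l).take (j + 1)) 0 = some sp[l] := by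
        rw [hconsform]; exact PySem.List.pyGet?_zero_cons _ _
      have hlast : PySem.List.pyGet? ((sp.drop l).take (j + 1)) (-1) = some sp[l + j] := by
        rw [PySem.List.pyGet?_neg_one, htake]
        simp
      -- indexing in B
      have hBl : PySem.List.pyGetD sp (l : Int) 0 = sp[l] := by
        rw [PySem.List.pyGetD_natCast]; simp [List.getD, hl]
      have hBr : PySem.List.pyGetD sp ((l : Int) + j) 0 = sp[l + j] := by
        have : ((l : Int) + j) = ((l + j : Nat) : Int) := by push_cast; ring
        rw [this, PySem.List.pyGetD_natCast]; simp [List.getD, hend]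
      -- the two step functions agree and maintain the invariant
      have hifmax : (if sp[l + j] > m then sp[l + j] else m) = max m sp[l + j] := by
        by_cases h : sp[l + j] > m
        · simp [h, max_eq_right (le_of_lt h)]
        · simp [h, max_eq_left (not_lt.mp h)]
      have hstepA : pvStepA sp l c ((l : Int) + j)
          = if sp[l] = max m sp[l + j] ∨ sp[l + j] = max m sp[l + j] then c + 1 else c := by
        unfold pvStepA
        rw [hslice]
        simp only [hhead, hlast, hmax?, Option.some.injEq]
      have hstepB : pvStepB sp l (m, c) ((l : Int) + j)
          = (max m sp[l + j],
             if sp[l] = max m sp[l + j] ∨ sp[l + j] = max m sp[l + j] then c + 1 else c) := by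
        unfold pvStepB
        simp only [hBl, hBr, hifmax]
      rw [hstepA, hstepB]
      have hcast : (l : Int) + j + 1 = (l : Int) + (j + 1 : Nat) := by push_cast; ring
      rw [hcast]
      exact ih (j + 1) _ _ (by omega) hm'.symm

theorem pv_outer_eq (sp : List Int) :
    ∀ (ls : List Int) (c : Int), (∀ x ∈ ls, 0 ≤ x ∧ x < sp.length) →
      ls.foldl (fun count l =>
        (PySem.List.pyRange l sp.length 1).foldl (pvStepA sp l) count) c
      = ls.foldl (fun count l =>
        ((PySem.List.pyRange l sp.length 1).foldl (pvStepB sp l)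
          (PySem.List.pyGetD sp l 0, count)).2) c := by
  intro ls
  induction ls with
  | nil => intro c _; rfl
  | cons a t ih =>
    intro c hmem
    obtain ⟨ha0, han⟩ := hmem a List.mem_cons_self
    obtain ⟨a', rfl⟩ : ∃ a' : Nat, a = (a' : Int) := ⟨a.toNat, by omega⟩
    have hlt : a' < sp.length := by omega
    simp only [List.foldl_cons]
    have key := pv_inner_eq sp a' hlt sp.length 0 c sp[a'] (by omega) (by simp)
    simp only [Nat.cast_zero, add_zero] at key
    have hBl : PySem.List.pyGetD sp (a' : Int) 0 = sp[a'] := by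
      rw [PySem.List.pyGetD_natCast]; simp [List.getD, hlt]
    rw [hBl, ← key]
    exact ih _ (fun x hx => hmem x (List.mem_cons_of_mem _ hx))

-- ===== VERDICT (by name: the statement is the Claim_ definition above) =====
theorem countMaximumProfitableGroups_spec : Claim_equal_countMaximumProfitableGroups := by
  intro sp _
  unfold Spec_countMaximumProfitableGroups countMaximumProfitableGroups countMaximumProfitableGroups_alt
  simp only
  have h := pv_outer_eq sp (PySem.List.pyRange 0 sp.length 1) 0
    (fun x hx => by
      have := (PySem.List.mem_pyRange_one).mp hx
      exact ⟨this.1, this.2⟩)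
  exact h
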